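-- pv_equiv track=rewrite | github.com/raspberrypilearning/mooc-dashboard | djangoapp/moocdashboard/apps/dashboard/widgets/charts.py | mergeQuerysetData
-- ===== SOURCE A (Python) =====
-- def mergeQuerysetData(list1,list2,category):
--     merged = {}
--     for item in list1+list2:
--         if item[category] in merged:
--             merged[item[category]].update(item)
--         else:
--             merged[item[category]] = item
--
--     return merged.values()
-- ===== SOURCE B (Python) =====
-- def mergeQuerysetData(list1, list2, category):
--     # Two-pass: bucket items by their category value (first-seen order),
--     # then merge each bucket into its first item (mutated in place, as A does).
--     groups = {}
--     for item in list1 + list2: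
--         groups.setdefault(item[category], []).append(item)
--     result = {}
--     for cat, items in groups.items():
--         base = items[0]
--         for other in items[1:]:
--             base.update(other)
--         result[cat] = base
--     return result.values()
-- ===== Notes on version B (the rewrite author's own statement) =====
-- stated objective: alternative
-- what changed: Replaces A's single-pass dict-merge (update-or-store per item) by a two-pass decomposition: first bucket items into per-category lists with setdefault/append, then merge each bucket into its first item and collect the results.
import Mathlib
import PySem

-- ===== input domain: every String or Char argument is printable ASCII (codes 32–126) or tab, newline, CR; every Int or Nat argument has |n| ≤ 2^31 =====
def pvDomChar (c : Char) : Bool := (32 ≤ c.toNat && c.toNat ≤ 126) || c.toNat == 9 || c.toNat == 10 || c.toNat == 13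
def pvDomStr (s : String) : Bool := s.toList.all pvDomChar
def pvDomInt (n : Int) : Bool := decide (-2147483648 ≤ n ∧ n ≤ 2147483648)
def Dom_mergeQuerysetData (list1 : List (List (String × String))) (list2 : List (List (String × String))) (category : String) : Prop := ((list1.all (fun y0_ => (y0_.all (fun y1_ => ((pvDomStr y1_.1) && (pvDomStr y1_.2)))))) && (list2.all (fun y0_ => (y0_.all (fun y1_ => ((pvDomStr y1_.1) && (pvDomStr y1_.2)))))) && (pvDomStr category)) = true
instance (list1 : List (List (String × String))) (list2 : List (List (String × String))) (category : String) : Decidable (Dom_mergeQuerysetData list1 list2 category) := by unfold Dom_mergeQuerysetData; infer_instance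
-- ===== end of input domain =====

-- B is a two-pass decomposition (bucket by category value, then merge each bucket); A is a
-- single-pass update-or-store merge. Both Pythons mutate input dicts in place identically;
-- the equivalence proved here is about the RETURN value.

-- ===== PORT A =====
-- A: merged = {}; for item in list1+list2: update-or-store keyed by item[category]; return merged.values()
def mergeQuerysetData (list1 : List (List (String × String))) (list2 : List (List (String × String))) (category : String) : List (List (String × String)) :=
  let merged := (list1 ++ list2).foldl (fun m item =>
    let d := PySem.Dict.ofList item            -- the item as a Python dict
    let k := d.getD category ""                -- item[category]; KeyError (missing key) is excluded by Pre_
    if m.contains k then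
      m.modify k PySem.Dict.empty (fun old => old.update d.items)   -- merged[item[category]].update(item)
    else
      m.insert k d)                            -- merged[item[category]] = item
    PySem.Dict.empty
  merged.values.map PySem.Dict.items

-- ===== PORT B =====
-- base = items[0]; for other in items[1:]: base.update(other)
def pvMergeGroup (l : List (PySem.Dict String String)) : PySem.Dict String String :=
  match l with
  | [] => PySem.Dict.empty
  | b :: rest => rest.foldl (fun b o => b.update o.items) b

-- B: groups.setdefault(item[category], []).append(item); then merge each group; return result.values()
def mergeQuerysetData_alt (list1 : List (List (String × String))) (list2 : List (List (String × String))) (category : String) : List (List (String × String)) :=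
  let groups := (list1 ++ list2).foldl (fun g item =>
    let d := PySem.Dict.ofList item
    g.modify (d.getD category "") [] (fun l => l ++ [d]))   -- setdefault(...,[]).append(item)
    PySem.Dict.empty
  let result := groups.items.foldl (fun r p => r.insert p.1 (pvMergeGroup p.2)) PySem.Dict.empty
  result.values.map PySem.Dict.items

-- ===== PRECONDITION & SPEC =====
-- Pre_ excludes exactly the inputs where A raises KeyError: some item lacks the category key.
def Pre_mergeQuerysetData (list1 : List (List (String × String))) (list2 : List (List (String × String))) (category : String) : Prop :=
  ∀ item ∈ list1 ++ list2, category ∈ item.map Prod.fst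
instance (list1 : List (List (String × String))) (list2 : List (List (String × String))) (category : String) : Decidable (Pre_mergeQuerysetData list1 list2 category) := by unfold Pre_mergeQuerysetData; infer_instance

def pvWitness_mergeQuerysetData : (List (List (String × String))) × (List (List (String × String))) × String :=
  ([[("cat", "a"), ("x", "1")]], [[("cat", "a"), ("y", "2")], [("cat", "b")]], "cat")

def Spec_mergeQuerysetData (list1 : List (List (String × String))) (list2 : List (List (String × String))) (category : String) (out : List (List (String × String))) : Prop := out = mergeQuerysetData_alt list1 list2 category
instance (list1 : List (List (String × String))) (list2 : List (List (String × String))) (category : String) (out : List (List (String × String))) : Decidable (Spec_mergeQuerysetData list1 list2 category out) := by unfold Spec_mergeQuerysetData; infer_instance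

-- ===== CLAIM (what is proved, stated in full; the proofs are below) =====
def Claim_equal_mergeQuerysetData : Prop := ∀ (list1 : List (List (String × String))) (list2 : List (List (String × String))) (category : String), Dom_mergeQuerysetData list1 list2 category → Pre_mergeQuerysetData list1 list2 category → Spec_mergeQuerysetData list1 list2 category (mergeQuerysetData list1 list2 category)

-- ===== LEMMAS AND PROOFS =====

-- abbreviations for the two loop bodies (proof-side only)
def pvKeyOf (category : String) (d : PySem.Dict String String) : String := d.getD category ""

def pvStA (category : String) (m : PySem.Dict String (PySem.Dict String String)) (d : PySem.Dict String String) : PySem.Dict String (PySem.Dict String String) :=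
  if m.contains (pvKeyOf category d) then
    m.modify (pvKeyOf category d) PySem.Dict.empty (fun old => old.update d.items)
  else
    m.insert (pvKeyOf category d) d

def pvStG (category : String) (g : PySem.Dict String (List (PySem.Dict String String))) (d : PySem.Dict String String) : PySem.Dict String (List (PySem.Dict String String)) :=
  g.modify (pvKeyOf category d) [] (fun l => l ++ [d])

def pvPhi (p : String × List (PySem.Dict String String)) : String × PySem.Dict String String := (p.1, pvMergeGroup p.2)

theorem pvMergeGroup_append (l : List (PySem.Dict String String)) (hl : l ≠ []) (d : PySem.Dict String String) :
    pvMergeGroup (l ++ [d]) = (pvMergeGroup l).update d.items := by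
  cases l with
  | nil => exact absurd rfl hl
  | cons b rest => simp [pvMergeGroup, List.foldl_append, PySem.Dict.update]

theorem pv_inv_step (category : String) (m : PySem.Dict String (PySem.Dict String String))
    (g : PySem.Dict String (List (PySem.Dict String String))) (d : PySem.Dict String String)
    (h : m.items = g.items.map pvPhi) (hne : ∀ p ∈ g.items, p.2 ≠ []) :
    (pvStA category m d).items = (pvStG category g d).items.map pvPhi ∧
      ∀ p ∈ (pvStG category g d).items, p.2 ≠ [] := by
  set c := pvKeyOf category d with hc
  have hkeys : m.contains c = g.contains c := by
    simp only [PySem.Dict.contains, h, List.any_map]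
    rfl
  have hget : m.get? c = (g.get? c).map pvMergeGroup := by
    simp only [PySem.Dict.get?, h, List.find?_map, Option.map_map]
    rfl
  by_cases hgc : g.contains c = true
  · -- key already present
    have hm : m.contains c = true := by rw [hkeys]; exact hgc
    obtain ⟨l, hl⟩ : ∃ l, g.get? c = some l := by
      have := PySem.Dict.contains_eq_isSome_get? g c
      rw [hgc] at this
      exact Option.isSome_iff_exists.mp this.symm
    have hlmem : (c, l) ∈ g.items := PySem.Dict.mem_items_of_get?_eq_some g hl
    have hlne : l ≠ [] := hne _ hlmem
    have hmgd : m.getD c PySem.Dict.empty = pvMergeGroup l := by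
      rw [PySem.Dict.getD_eq_get?_getD, hget, hl]; rfl
    have hggd : g.getD c [] = l := by rw [PySem.Dict.getD_eq_get?_getD, hl]; rfl
    constructor
    · simp only [pvStA, pvStG, PySem.Dict.modify]
      rw [← hc, if_pos hm]
      rw [PySem.Dict.items_insert_of_contains m _ hm,
          PySem.Dict.items_insert_of_contains g _ hgc, h, hmgd, hggd,
          List.map_map, List.map_map]
      refine List.map_eq_map_iff.mpr (fun p _ => ?_)
      by_cases hp : (p.1 == c) = true <;>
        simp [Function.comp, pvPhi, hp, pvMergeGroup_append l hlne d]
    · intro p hp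
      simp only [pvStG, PySem.Dict.modify] at hp
      rw [← hc, PySem.Dict.items_insert_of_contains g _ hgc] at hp
      obtain ⟨q, hq, hqe⟩ := List.mem_map.mp hp
      by_cases hq1 : (q.1 == c) = true
      · rw [if_pos hq1] at hqe
        rw [← hqe]; simp [hggd]
      · rw [if_neg hq1] at hqe
        rw [← hqe]; exact hne q hq
  · -- new key
    have hgc' : g.contains c = false := by simpa using hgc
    have hm : m.contains c = false := by rw [hkeys]; exact hgc'
    have hggd : g.getD c [] = [] := PySem.Dict.getD_of_not_contains g [] hgc'
    constructor
    · simp only [pvStA, pvStG, PySem.Dict.modify]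
      rw [← hc, if_neg (by simp [hm])]
      rw [PySem.Dict.items_insert_of_not_contains m d hm,
          PySem.Dict.items_insert_of_not_contains g _ hgc', hggd, List.map_append, ← h]
      simp [pvPhi, pvMergeGroup]
    · intro p hp
      simp only [pvStG, PySem.Dict.modify] at hp
      rw [← hc, PySem.Dict.items_insert_of_not_contains g _ hgc', hggd] at hp
      rcases List.mem_append.mp hp with h1 | h1
      · exact hne p h1
      · simp at h1; rw [h1]; simp

theorem pv_inv_fold (category : String) (ds : List (PySem.Dict String String)) :
    ∀ (m : PySem.Dict String (PySem.Dict String String)) (g : PySem.Dict String (List (PySem.Dict String String))),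
      m.items = g.items.map pvPhi → (∀ p ∈ g.items, p.2 ≠ []) →
      (ds.foldl (pvStA category) m).items = (ds.foldl (pvStG category) g).items.map pvPhi ∧
        ∀ p ∈ (ds.foldl (pvStG category) g).items, p.2 ≠ [] := by
  induction ds with
  | nil => exact fun m g h hne => ⟨h, hne⟩
  | cons d ds ih =>
    intro m g h hne
    have := pv_inv_step category m g d h hne
    exact ih _ _ this.1 this.2

theorem pv_main (list1 list2 : List (List (String × String))) (category : String) :
    mergeQuerysetData list1 list2 category = mergeQuerysetData_alt list1 list2 category := by
  unfold mergeQuerysetData mergeQuerysetData_alt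
  have hA : (list1 ++ list2).foldl (fun m item =>
      let d := PySem.Dict.ofList item
      let k := d.getD category ""
      if m.contains k then
        m.modify k PySem.Dict.empty (fun old => old.update d.items)
      else m.insert k d) PySem.Dict.empty
      = ((list1 ++ list2).map PySem.Dict.ofList).foldl (pvStA category) PySem.Dict.empty := by
    rw [List.foldl_map]; rfl
  have hG : (list1 ++ list2).foldl (fun g item =>
      let d := PySem.Dict.ofList item
      g.modify (d.getD category "") [] (fun l => l ++ [d])) PySem.Dict.empty
      = ((list1 ++ list2).map PySem.Dict.ofList).foldl (pvStG category) PySem.Dict.empty := by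
    rw [List.foldl_map]; rfl
  simp only [hA, hG]
  set ds := (list1 ++ list2).map PySem.Dict.ofList with hds
  set G := ds.foldl (pvStG category) PySem.Dict.empty with hGdef
  have hinv := pv_inv_fold category ds PySem.Dict.empty PySem.Dict.empty (by rfl) (by intro p hp; simp [PySem.Dict.empty] at hp)
  have hnodup : G.keys.Nodup := by
    rw [hGdef]
    exact PySem.Dict.nodup_keys_foldl_modify_key ds (pvKeyOf category) []
      (fun _ d => (fun l => l ++ [d])) PySem.Dict.empty PySem.Dict.nodup_keys_empty
  have hres : (G.items.foldl (fun r p => r.insert p.1 (pvMergeGroup p.2)) PySem.Dict.empty).items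
      = G.items.map pvPhi := by
    rw [PySem.Dict.items_foldl_insert_fresh G.items Prod.fst (fun p => pvMergeGroup p.2)
      PySem.Dict.empty (fun a _ => by simp [PySem.Dict.contains_empty]) hnodup]
    rfl
  simp only [PySem.Dict.values]
  rw [hinv.1, hres]

-- ===== VERDICT (by name: the statement is the Claim_ definition above) =====
theorem mergeQuerysetData_spec : Claim_equal_mergeQuerysetData := by
  intro list1 list2 category _ _
  exact pv_main list1 list2 category
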